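-- pv_equiv track=rewrite | github.com/maximerenault/PegSolitaireSolver | check_board.py | check_one_possible_solution
-- ===== SOURCE A (Python) =====
-- CaleyTable = [
--     [0, 1, 2, 3],
--     [1, 0, 3, 2],
--     [2, 3, 0, 1],
--     [3, 2, 1, 0],
-- ]
--
-- def phi(board):
--     phi = [0, 0]
--     for i in range(len(board)):
--         for j in range(len(board[i])):
--             if board[i][j] == 1:
--                 phi_ = phi_ij(i, j)
--                 phi = add_phi(phi, phi_)
--     return phi
--
-- def phi_ij(i, j):
--     return [(i + j) % 3 + 1, (i - j) % 3 + 1]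
--
-- def add_phi(phi1, phi2):
--     return [CaleyTable[phi1[0]][phi2[0]], CaleyTable[phi1[1]][phi2[1]]]
--
-- def check_one_possible_solution(board):
--     phi_board = phi(board)
--     for i in range(len(board)):
--         for j in range(len(board[i])):
--             if board[i][j] == 1:
--                 if phi_board == phi_ij(i, j):
--                     return True
--     return False
-- ===== SOURCE B (Python) =====
-- def check_one_possible_solution(board):
--     # Single pass: XOR-accumulate phi (the Cayley table is XOR on {0..3}) and
--     # record which of the 9 residue classes contains a peg; the final answer is
--     # one set-membership test -- no second scan over the board.
--     seen = set()
--     p0 = 0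
--     p1 = 0
--     for i, row in enumerate(board):
--         for j, cell in enumerate(row):
--             if cell == 1:
--                 s, d = (i + j) % 3, (i - j) % 3
--                 seen.add((s, d))
--                 p0 ^= s + 1
--                 p1 ^= d + 1
--     return (p0 - 1, p1 - 1) in seen
-- ===== Notes on version B (the rewrite author's own statement) =====
-- stated objective: alternative
-- what changed: Replaces A's two board scans (a Cayley-table group fold, then a rescan comparing each peg's phi to phi_board) by a single pass that XOR-accumulates phi and records the occupied (i+j)%3/(i-j)%3 residue classes in a set, finishing with one set-membership test instead of a second scan.
import Mathlib
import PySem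

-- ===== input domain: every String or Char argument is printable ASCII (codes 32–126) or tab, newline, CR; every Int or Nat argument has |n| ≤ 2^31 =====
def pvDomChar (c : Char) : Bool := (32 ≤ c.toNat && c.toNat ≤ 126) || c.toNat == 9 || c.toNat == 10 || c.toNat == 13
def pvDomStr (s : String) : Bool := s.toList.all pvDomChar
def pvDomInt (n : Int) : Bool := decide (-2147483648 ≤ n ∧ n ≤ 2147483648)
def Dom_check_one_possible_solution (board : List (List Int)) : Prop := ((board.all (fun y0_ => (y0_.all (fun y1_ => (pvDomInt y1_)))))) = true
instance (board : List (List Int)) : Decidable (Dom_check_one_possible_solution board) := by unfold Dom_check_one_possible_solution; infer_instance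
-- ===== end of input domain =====

-- B folds the board once, XOR-accumulating phi and collecting the occupied residue
-- classes in a set, then answers with one membership test (alternative, same cost).

-- ===== PORT A =====
def CaleyTable : List (List Int) :=
  [[0, 1, 2, 3],
   [1, 0, 3, 2],
   [2, 3, 0, 1],
   [3, 2, 1, 0]]

def phi_ij (i j : Int) : List Int :=
  [PySem.Int.mod (i + j) 3 + 1, PySem.Int.mod (i - j) 3 + 1]

-- list indexing; on every call A makes the index is in range, so IndexError is unreachable
def pyAt (l : List Int) (i : Int) : Int := (PySem.List.pyGet? l i).getD 0
def pyAtL (l : List (List Int)) (i : Int) : List Int := (PySem.List.pyGet? l i).getD []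

def add_phi (phi1 phi2 : List Int) : List Int :=
  [pyAt (pyAtL CaleyTable (pyAt phi1 0)) (pyAt phi2 0),
   pyAt (pyAtL CaleyTable (pyAt phi1 1)) (pyAt phi2 1)]

def phi (board : List (List Int)) : List Int :=
  (PySem.List.enumerate board 0).foldl
    (fun ph p =>
      (PySem.List.enumerate p.2 0).foldl
        (fun ph q => if q.2 == 1 then add_phi ph (phi_ij p.1 q.1) else ph) ph)
    [0, 0]

def check_one_possible_solution (board : List (List Int)) : Bool :=
  let phi_board := phi board
  (PySem.List.enumerate board 0).any (fun p =>
    (PySem.List.enumerate p.2 0).any (fun q =>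
      q.2 == 1 && phi_board == phi_ij p.1 q.1))

-- ===== PORT B =====
def check_one_possible_solution_alt (board : List (List Int)) : Bool :=
  let st := (PySem.List.enumerate board 0).foldl
    (fun (st : PySem.Set (Int × Int) × Int × Int) p =>
      (PySem.List.enumerate p.2 0).foldl
        (fun st q =>
          if q.2 == 1 then
            let s := PySem.Int.mod (p.1 + q.1) 3
            let d := PySem.Int.mod (p.1 - q.1) 3
            (PySem.Set.add st.1 (s, d),
             PySem.Int.bxor st.2.1 (s + 1),
             PySem.Int.bxor st.2.2 (d + 1))
          else st) st)
    (PySem.Set.empty, 0, 0)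
  PySem.Set.contains st.1 (st.2.1 - 1, st.2.2 - 1)

-- ===== PRECONDITION & SPEC =====
def Spec_check_one_possible_solution (board : List (List Int)) (out : Bool) : Prop := out = check_one_possible_solution_alt board
instance (board : List (List Int)) (out : Bool) : Decidable (Spec_check_one_possible_solution board out) := by unfold Spec_check_one_possible_solution; infer_instance

-- ===== CLAIM =====
def Claim_equal_check_one_possible_solution : Prop := ∀ (board : List (List Int)), Dom_check_one_possible_solution board → Spec_check_one_possible_solution board (check_one_possible_solution board)

-- ===== LEMMAS AND PROOFS =====

-- the common traversal: coordinates of the pegs, in scan order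
def pegList (board : List (List Int)) : List (Int × Int) :=
  (PySem.List.enumerate board 0).flatMap (fun p =>
    ((PySem.List.enumerate p.2 0).filter (fun q => q.2 == 1)).map (fun q => (p.1, q.1)))

theorem nested_foldl {σ : Type} (board : List (List Int)) (f : σ → Int → Int → σ) (init : σ) :
    (PySem.List.enumerate board 0).foldl
      (fun s p => (PySem.List.enumerate p.2 0).foldl
        (fun s q => if q.2 == 1 then f s p.1 q.1 else s) s) init
    = (pegList board).foldl (fun s ij => f s ij.1 ij.2) init := by
  unfold pegList
  rw [List.foldl_flatMap]
  congr 1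
  funext s p
  rw [List.foldl_map, ← PySem.List.foldl_if_eq_foldl_filter]

theorem nested_any (board : List (List Int)) (P : Int → Int → Bool) :
    (PySem.List.enumerate board 0).any (fun p =>
      (PySem.List.enumerate p.2 0).any (fun q => q.2 == 1 && P p.1 q.1))
    = (pegList board).any (fun ij => P ij.1 ij.2) := by
  unfold pegList
  rw [List.any_flatMap]
  congr 1
  funext p
  rw [List.any_map, List.any_filter]
  simp

-- B's triple fold splits into three independent folds
theorem triple_fold (l : List (Int × Int)) (s0 : PySem.Set (Int × Int)) (a b : Int) :
    l.foldl (fun (st : PySem.Set (Int × Int) × Int × Int) ij =>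
        (PySem.Set.add st.1 (PySem.Int.mod (ij.1 + ij.2) 3, PySem.Int.mod (ij.1 - ij.2) 3),
         PySem.Int.bxor st.2.1 (PySem.Int.mod (ij.1 + ij.2) 3 + 1),
         PySem.Int.bxor st.2.2 (PySem.Int.mod (ij.1 - ij.2) 3 + 1))) (s0, a, b)
    = (l.foldl (fun s ij =>
          PySem.Set.add s (PySem.Int.mod (ij.1 + ij.2) 3, PySem.Int.mod (ij.1 - ij.2) 3)) s0,
       l.foldl (fun p ij => PySem.Int.bxor p (PySem.Int.mod (ij.1 + ij.2) 3 + 1)) a,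
       l.foldl (fun p ij => PySem.Int.bxor p (PySem.Int.mod (ij.1 - ij.2) 3 + 1)) b) := by
  induction l generalizing s0 a b with
  | nil => rfl
  | cons hd t ih => simp only [List.foldl_cons]; exact ih _ _ _

theorem cayley_xor (p m : Int) (hp : 0 ≤ p ∧ p < 4) (hm : 0 ≤ m ∧ m < 3) :
    pyAt (pyAtL CaleyTable p) (m + 1) = PySem.Int.bxor p (m + 1) := by
  obtain ⟨h1, h2⟩ := hp; obtain ⟨h3, h4⟩ := hm
  have h : p = 0 ∨ p = 1 ∨ p = 2 ∨ p = 3 := by omega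
  have hm' : m = 0 ∨ m = 1 ∨ m = 2 := by omega
  rcases h with h | h | h | h <;> rcases hm' with h' | h' | h' <;> subst h h' <;> decide

theorem bxor_range (p x : Int) (hp : 0 ≤ p ∧ p < 4) (hx : 0 ≤ x ∧ x < 4) :
    0 ≤ PySem.Int.bxor p x ∧ PySem.Int.bxor p x < 4 := by
  obtain ⟨h1, h2⟩ := hp; obtain ⟨h3, h4⟩ := hx
  have h : p = 0 ∨ p = 1 ∨ p = 2 ∨ p = 3 := by omega
  have h' : x = 0 ∨ x = 1 ∨ x = 2 ∨ x = 3 := by omega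
  rcases h with h | h | h | h <;> rcases h' with h' | h' | h' | h' <;> subst h h' <;> decide

theorem mod3_range (x : Int) : 0 ≤ PySem.Int.mod x 3 ∧ PySem.Int.mod x 3 < 3 :=
  ⟨PySem.Int.mod_nonneg x (by norm_num), PySem.Int.mod_lt x (by norm_num)⟩

-- A's group fold equals the pair of XOR folds (phi components stay in {0..3})
theorem fold_rel : ∀ (l : List (Int × Int)) (a b : Int),
    0 ≤ a ∧ a < 4 → 0 ≤ b ∧ b < 4 →
    l.foldl (fun ph ij => add_phi ph (phi_ij ij.1 ij.2)) [a, b]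
    = [l.foldl (fun p ij => PySem.Int.bxor p (PySem.Int.mod (ij.1 + ij.2) 3 + 1)) a,
       l.foldl (fun p ij => PySem.Int.bxor p (PySem.Int.mod (ij.1 - ij.2) 3 + 1)) b] := by
  intro l
  induction l with
  | nil => intro a b _ _; rfl
  | cons hd t ih =>
    intro a b ha hb
    simp only [List.foldl_cons]
    have e0 : ∀ x y : Int, pyAt [x, y] 0 = x := by
      intro x y; simp [pyAt, PySem.List.pyGet?, PySem.List.pyIdx?]
    have e1 : ∀ x y : Int, pyAt [x, y] 1 = y := by
      intro x y; simp [pyAt, PySem.List.pyGet?, PySem.List.pyIdx?]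
    have step : add_phi [a, b] (phi_ij hd.1 hd.2)
        = [PySem.Int.bxor a (PySem.Int.mod (hd.1 + hd.2) 3 + 1),
           PySem.Int.bxor b (PySem.Int.mod (hd.1 - hd.2) 3 + 1)] := by
      simp only [add_phi, phi_ij]
      rw [e0, e1, e0, e1,
          cayley_xor a _ ha (mod3_range (hd.1 + hd.2)),
          cayley_xor b _ hb (mod3_range (hd.1 - hd.2))]
    rw [step]
    have h1 := mod3_range (hd.1 + hd.2)
    have h2 := mod3_range (hd.1 - hd.2)
    exact ih _ _ (bxor_range a _ ha ⟨by omega, by omega⟩)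
                 (bxor_range b _ hb ⟨by omega, by omega⟩)

-- membership in the fold-built set = a peg of that residue class exists
theorem mem_fold_add (l : List (Int × Int)) (s0 : PySem.Set (Int × Int)) (x : Int × Int) :
    (x ∈ l.foldl (fun s ij =>
        PySem.Set.add s (PySem.Int.mod (ij.1 + ij.2) 3, PySem.Int.mod (ij.1 - ij.2) 3)) s0)
    ↔ x ∈ s0 ∨ ∃ ij ∈ l, (PySem.Int.mod (ij.1 + ij.2) 3, PySem.Int.mod (ij.1 - ij.2) 3) = x := by
  induction l generalizing s0 with
  | nil => simp
  | cons hd t ih =>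
    simp only [List.foldl_cons, ih, PySem.Set.mem_add, List.mem_cons]
    constructor
    · rintro (⟨h | h⟩ | ⟨ij, hij, rfl⟩)
      · exact Or.inl h
      · exact Or.inr ⟨hd, Or.inl rfl, h.symm⟩
      · exact Or.inr ⟨ij, Or.inr hij, rfl⟩
    · rintro (h | ⟨ij, hij | hij, rfl⟩)
      · exact Or.inl (Or.inl h)
      · exact Or.inl (Or.inr (by rw [hij]))
      · exact Or.inr ⟨ij, hij, rfl⟩

theorem contains_eq_decide_mem (s : PySem.Set (Int × Int)) (x : Int × Int) :
    PySem.Set.contains s x = decide (x ∈ s) := by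
  by_cases h : x ∈ s
  · rw [(PySem.Set.contains_iff s x).2 h]; simp [h]
  · simp only [h, decide_false]
    exact Bool.eq_false_iff.2 (fun hc => h ((PySem.Set.contains_iff s x).1 hc))

theorem match_iff (P0 P1 : Int) (ij : Int × Int) :
    (([P0, P1] == phi_ij ij.1 ij.2) = true)
    ↔ (PySem.Int.mod (ij.1 + ij.2) 3, PySem.Int.mod (ij.1 - ij.2) 3) = (P0 - 1, P1 - 1) := by
  simp only [phi_ij, beq_iff_eq, List.cons.injEq, and_true, Prod.mk.injEq]
  omega

-- ===== VERDICT =====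
theorem check_one_possible_solution_spec : Claim_equal_check_one_possible_solution := by
  intro board _
  show check_one_possible_solution board = check_one_possible_solution_alt board
  simp only [check_one_possible_solution, check_one_possible_solution_alt, phi]
  simp only [nested_foldl board (fun ph i j => add_phi ph (phi_ij i j)) [0, 0],
    nested_foldl board (fun (st : PySem.Set (Int × Int) × Int × Int) i j =>
      (PySem.Set.add st.1 (PySem.Int.mod (i + j) 3, PySem.Int.mod (i - j) 3),
       PySem.Int.bxor st.2.1 (PySem.Int.mod (i + j) 3 + 1),
       PySem.Int.bxor st.2.2 (PySem.Int.mod (i - j) 3 + 1)))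
      (PySem.Set.empty, 0, 0)]
  rw [triple_fold (pegList board) PySem.Set.empty 0 0,
      fold_rel (pegList board) 0 0 ⟨by norm_num, by norm_num⟩ ⟨by norm_num, by norm_num⟩]
  set P0 : Int :=
    (pegList board).foldl (fun p ij => PySem.Int.bxor p (PySem.Int.mod (ij.1 + ij.2) 3 + 1)) 0
  set P1 : Int :=
    (pegList board).foldl (fun p ij => PySem.Int.bxor p (PySem.Int.mod (ij.1 - ij.2) 3 + 1)) 0
  simp only [nested_any board (fun i j => [P0, P1] == phi_ij i j)]
  rw [contains_eq_decide_mem]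
  rw [Bool.eq_iff_iff]
  simp only [List.any_eq_true, decide_eq_true_eq, mem_fold_add, match_iff]
  simp [PySem.Set.empty]
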